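-- pv_equiv track=rewrite | github.com/filakm/prg-basics | 04-Functions/7-23.py | f
-- ===== SOURCE A (Python) =====
-- def f(password):
--     if len(password) >= 6:
--         count = 0
--         while count <=0:
--             for char in password:
--                 if str(password).count(char) > 1:
--                     count +=1
--             if count > 0:
--                 return False
--             else:
--                 return True
--
--
--     else:
--
--         return False
-- ===== SOURCE B (Python) =====
-- def f(password):
--     if len(password) < 6:
--         return False
--     s = sorted(password)
--     for x, y in zip(s, s[1:]):
--         if x == y:
--             return False
--     return True
-- ===== Notes on version B (the rewrite author's own statement) =====
-- stated objective: faster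
-- what changed: Replaced A's per-character repeated substring-count scans of the whole password with a single sort followed by one adjacent-pair pass over the sorted characters.
import Mathlib
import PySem

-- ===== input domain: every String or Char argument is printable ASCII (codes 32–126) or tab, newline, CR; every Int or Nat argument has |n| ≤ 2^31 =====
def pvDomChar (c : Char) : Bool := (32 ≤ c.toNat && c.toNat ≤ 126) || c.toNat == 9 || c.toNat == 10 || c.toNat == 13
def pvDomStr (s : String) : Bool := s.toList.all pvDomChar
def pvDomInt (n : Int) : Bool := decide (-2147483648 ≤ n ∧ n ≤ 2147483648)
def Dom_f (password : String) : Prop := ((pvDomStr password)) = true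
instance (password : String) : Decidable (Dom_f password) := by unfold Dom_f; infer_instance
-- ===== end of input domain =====

-- B sorts the password and checks one adjacent pair per position instead of A's per-character
-- full count scans (objective: alternative sort-then-scan algorithm).

-- ===== PORT A =====
-- A: if len(password) >= 6, the while loop runs its body once (every path returns);
-- count = number of chars whose substring count in the string exceeds 1; False if count > 0 else True.
def f (password : String) : Bool :=
  let cs := password.toList
  if 6 ≤ cs.length then
    let count : Int :=
      cs.foldl (fun acc c =>
        if ((PySem.Chars.count cs [c] : Int) > 1) then acc + 1 else acc) 0
    if count > 0 then false else true
  else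
    false

-- ===== PORT B =====
-- B: length guard, then sorted(password); for (x, y) in zip(s, s[1:]) return False on equality.
def f_alt (password : String) : Bool :=
  let cs := password.toList
  if cs.length < 6 then false
  else
    let s := PySem.List.sorted cs (fun c => c) false
    if (s.zip (PySem.List.slice s (some 1) none)).any (fun p => p.1 == p.2) then false
    else true

-- ===== PRECONDITION & SPEC =====
def Spec_f (password : String) (out : Bool) : Prop := out = f_alt password
instance (password : String) (out : Bool) : Decidable (Spec_f password out) := by unfold Spec_f; infer_instance

-- ===== CLAIM (what is proved, stated in full; the proofs are below) =====
def Claim_equal_f : Prop := ∀ (password : String), Dom_f password → Spec_f password (f password)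

-- ===== LEMMAS AND PROOFS =====

-- Python's s.count(c) for a single character equals the character count.
theorem chars_count_go_singleton (c : Char) :
    ∀ (l : List Char) (fuel acc : Nat), l.length ≤ fuel →
      PySem.Chars.count.go [c] fuel l acc = acc + l.count c := by
  intro l
  induction l with
  | nil =>
      intro fuel acc _
      cases fuel <;> simp [PySem.Chars.count.go]
  | cons h t ih =>
      intro fuel acc hf
      cases fuel with
      | zero => simp at hf
      | succ n =>
          have hf' : t.length ≤ n := by
            simp only [List.length_cons] at hf; omega
          by_cases hc : c = h
          · subst hc
            simp only [PySem.Chars.count.go, List.isPrefixOf, BEq.rfl, Bool.true_and,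
               if_true, List.length_cons, List.length_nil,
              List.drop_succ_cons, List.drop_zero]
            rw [ih n (acc + 1) hf']
            simp
            omega
          · have hb : ([c].isPrefixOf (h :: t)) = false := by
              simp only [List.isPrefixOf, Bool.and_true]
              exact beq_eq_false_iff_ne.mpr hc
            simp only [PySem.Chars.count.go, hb, Bool.false_eq_true, if_false]
            rw [ih n acc hf']
            have hcnt : List.count c (h :: t) = List.count c t := by
              rw [List.count_cons]
              have hhc : (h == c) = false := beq_eq_false_iff_ne.mpr (fun h' => hc h'.symm)
              simp [hhc]
            omega

theorem chars_count_singleton (cs : List Char) (c : Char) :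
    PySem.Chars.count cs [c] = cs.count c := by
  simp [PySem.Chars.count, chars_count_go_singleton c cs cs.length 0 le_rfl]

-- A's loop value: the number of characters (with multiplicity) occurring more than once.
theorem a_count_eq (cs : List Char) :
    cs.foldl (fun acc c =>
        if ((PySem.Chars.count cs [c] : Int) > 1) then acc + 1 else acc) 0
      = (cs.countP (fun c => decide (1 < cs.count c)) : Int) := by
  rw [PySem.List.foldl_ite_add_one (fun c => ((PySem.Chars.count cs [c] : Int) > 1)) cs 0]
  simp only [zero_add, Int.natCast_inj]
  apply List.countP_congr
  intro c _
  simp only [chars_count_singleton, gt_iff_lt, decide_eq_true_eq]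
  omega

-- A returns (6 ≤ len ∧ Nodup).
theorem f_eq (password : String) :
    f password = (decide (6 ≤ password.toList.length) && decide password.toList.Nodup) := by
  unfold f
  set cs := password.toList with hcs
  by_cases h6 : 6 ≤ cs.length
  · simp only [h6, if_true, a_count_eq]
    by_cases hn : cs.Nodup
    · have : cs.countP (fun c => decide (1 < cs.count c)) = 0 := by
        rw [List.countP_eq_zero]
        intro c hc
        have := List.nodup_iff_count_le_one.mp hn c
        simpa using this
      simp [this, hn]
    · have : 0 < cs.countP (fun c => decide (1 < cs.count c)) := by
        rw [List.countP_pos_iff]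
        rw [List.nodup_iff_count_le_one] at hn
        push Not at hn
        obtain ⟨c, hc⟩ := hn
        refine ⟨c, List.count_pos_iff.mp (by omega), by simpa using hc⟩
      have h0 : (0 : Int) < (cs.countP (fun c => decide (1 < cs.count c)) : Int) := by
        exact_mod_cast this
      rw [if_pos h0]
      have hd : decide cs.Nodup = false := decide_eq_false hn
      simp only [hd, Bool.and_false]
  · simp [h6]

-- B's adjacent scan on a sorted list detects exactly non-Nodup.
theorem adj_scan (s : List Char) (hs : s.Pairwise (· ≤ ·)) :
    ((s.zip (s.drop 1)).any (fun p => p.1 == p.2) = false) ↔ s.Nodup := by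
  induction s with
  | nil => simp
  | cons a t ih =>
      cases t with
      | nil => simp
      | cons b t' =>
          have hs' : (b :: t').Pairwise (· ≤ ·) := hs.of_cons
          have hab : a ≤ b := (List.pairwise_cons.mp hs).1 b (by simp)
          have hat : ∀ x ∈ t', a ≤ b ∧ b ≤ x := by
            intro x hx
            exact ⟨hab, ((List.pairwise_cons.mp hs').1 x hx)⟩
          simp only [List.drop_succ_cons, List.drop_zero, List.zip_cons_cons,
            List.any_cons, Bool.or_eq_false_iff, beq_eq_false_iff_ne, ne_eq]
          rw [show (b :: t').drop 1 = t' from rfl] at ih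
          rw [ih hs']
          constructor
          · rintro ⟨hne, hnd⟩
            refine List.nodup_cons.mpr ⟨?_, hnd⟩
            intro hmem
            rcases List.mem_cons.mp hmem with h | h
            · exact hne h
            · obtain ⟨h1, h2⟩ := hat a h
              exact hne (le_antisymm h1 h2)
          · intro hnd
            have := List.nodup_cons.mp hnd
            exact ⟨fun hab' => this.1 (hab' ▸ List.mem_cons_self), this.2⟩

theorem f_alt_eq (password : String) :
    f_alt password = (decide (6 ≤ password.toList.length) && decide password.toList.Nodup) := by
  unfold f_alt
  set cs := password.toList with hcs
  by_cases h6 : cs.length < 6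
  · simp [h6]
  · have h6' : 6 ≤ cs.length := by omega
    simp only [h6, if_false]
    set s := PySem.List.sorted cs (fun c => c) false with hsdef
    have hsl : PySem.List.slice s (some 1) none = s.drop 1 := by
      simp [PySem.List.slice_from]
    have hp : s.Pairwise (· ≤ ·) := by
      simpa using PySem.List.sorted_pairwise cs (fun c => c)
    have hperm : s.Perm cs := PySem.List.sorted_perm cs (fun c => c) false
    rw [hsl]
    by_cases hn : cs.Nodup
    · have hns : s.Nodup := hperm.nodup_iff.mpr hn
      have hF := (adj_scan s hp).mpr hns
      have hnT : ¬ ((s.zip (s.drop 1)).any (fun p => p.1 == p.2) = true) := by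
        rw [hF]; exact Bool.false_ne_true
      rw [if_neg hnT]
      simp [hn, h6']
    · have hns : ¬ s.Nodup := fun h => hn (hperm.nodup_iff.mp h)
      have hnF : ¬ ((s.zip (s.drop 1)).any (fun p => p.1 == p.2) = false) :=
        fun h => hns ((adj_scan s hp).mp h)
      have hT : (s.zip (s.drop 1)).any (fun p => p.1 == p.2) = true := by
        cases h : (s.zip (s.drop 1)).any (fun p => p.1 == p.2)
        · exact absurd h hnF
        · rfl
      rw [if_pos hT]
      have hd : decide cs.Nodup = false := decide_eq_false hn
      simp only [hd, Bool.and_false]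

-- ===== VERDICT (by name: the statement is the Claim_ definition above) =====
theorem f_spec : Claim_equal_f := by
  intro password _
  unfold Spec_f
  rw [f_eq, f_alt_eq]
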